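-- pv_equiv track=rewrite | github.com/wulinlw/leetcode_cn | 初级算法/other_3.py | reverseBits3
-- ===== SOURCE A (Python) =====
-- def reverseBits3(n):
--     c=32
--     re = 0
--     while c>0:
--         if n&1 ==1:
--             tmp = 1<<(c-1)
--             re = re^tmp
--         n=n>>1
--         c-=1
--     return re
-- ===== SOURCE B (Python) =====
-- def _rev(m, w):
--     # reverse the low w bits of m (w a power of two), divide and conquer:
--     # reversed halves swap places
--     if w == 1:
--         return m & 1
--     h = w >> 1
--     return (_rev(m % (1 << h), h) << h) + _rev(m >> h, h)
--
-- def reverseBits3(n):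
--     return _rev(n % (1 << 32), 32)
-- ===== Notes on version B (the rewrite author's own statement) =====
-- stated objective: alternative
-- what changed: Replaces the per-bit test/xor accumulation loop by a divide-and-conquer reversal of the 32-bit window: mask the input, then recursively reverse each half of the window and swap the halves, down to single bits.
import Mathlib
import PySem

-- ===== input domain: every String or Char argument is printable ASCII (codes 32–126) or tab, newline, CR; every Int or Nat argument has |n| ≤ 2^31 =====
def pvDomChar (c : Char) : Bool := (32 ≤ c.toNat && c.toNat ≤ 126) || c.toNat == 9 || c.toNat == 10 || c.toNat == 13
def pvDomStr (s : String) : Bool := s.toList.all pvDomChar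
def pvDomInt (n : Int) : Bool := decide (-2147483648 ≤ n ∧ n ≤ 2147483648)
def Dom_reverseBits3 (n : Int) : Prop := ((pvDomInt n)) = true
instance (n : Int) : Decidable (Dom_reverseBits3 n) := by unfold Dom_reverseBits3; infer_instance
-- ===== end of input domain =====

-- B replaces A's 32-iteration test-a-bit/xor-a-bit accumulation loop by a divide-and-conquer
-- reversal (reverse each half of the bit window, swap the halves); equal return value proved for all n.

-- ===== PORT A =====
-- while c>0: if n&1==1: re ^= 1<<(c-1); n >>= 1; c -= 1   (c counts 32,31,…,1)
def reverseBits3Loop (n : Int) (c : Nat) (re : Int) : Int :=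
  match c with
  | 0 => re
  | Nat.succ k =>
    reverseBits3Loop (n >>> (1 : Nat)) k
      (if PySem.Int.band n 1 = 1 then PySem.Int.bxor re ((1 : Int) <<< k) else re)

def reverseBits3 (n : Int) : Int := reverseBits3Loop n 32 0

-- ===== PORT B =====
-- _rev(m, w): reverse the low w bits of m (w a power of two): reverse each half, swap halves.
-- Python's `if w == 1` leaf is `w ≤ 1` here for totality; w = 0 is unreachable (w is always a power of two).
def revAux (m : Int) (w : Nat) : Int :=
  if w ≤ 1 then PySem.Int.band m 1
  else
    let h := w >>> 1
    (revAux (PySem.Int.mod m ((1 : Int) <<< h)) h) <<< h + revAux (m >>> h) h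
termination_by w
decreasing_by all_goals simp [Nat.shiftRight_one]; omega

def reverseBits3_alt (n : Int) : Int := revAux (PySem.Int.mod n ((1 : Int) <<< 32)) 32

-- ===== PRECONDITION & SPEC =====
def Spec_reverseBits3 (n : Int) (out : Int) : Prop := out = reverseBits3_alt n
instance (n : Int) (out : Int) : Decidable (Spec_reverseBits3 n out) := by unfold Spec_reverseBits3; infer_instance

-- ===== CLAIM (what is proved, stated in full; the proofs are below) =====
def Claim_equal_reverseBits3 : Prop := ∀ (n : Int), Dom_reverseBits3 n → Spec_reverseBits3 n (reverseBits3 n)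

-- ===== LEMMAS AND PROOFS =====

-- reference value: the reversal of the low c bits of n, MSB of the window first
def pvR (n : Int) : Nat → Int
  | 0 => 0
  | Nat.succ c => PySem.Int.mod n 2 * 2 ^ c + pvR (n >>> (1 : Nat)) c

lemma nat_xor_pow (c j : Nat) : (2 ^ (c+1) * j) ^^^ 2 ^ c = 2 ^ (c+1) * j + 2 ^ c := by
  apply Nat.eq_of_testBit_eq
  intro i
  rw [Nat.testBit_xor, Nat.testBit_two_pow_mul_add j (Nat.pow_lt_pow_succ (by norm_num)) i,
      show 2 ^ (c+1) * j = 2 ^ (c+1) * j + 0 by ring,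
      Nat.testBit_two_pow_mul_add j (by positivity) i]
  by_cases hi : i < c + 1
  · simp [hi]
  · simp [hi, show c ≠ i by omega]

lemma bxor_pow (re : Int) (c : Nat) (h0 : 0 ≤ re) (hd : (2 ^ (c+1) : Int) ∣ re) :
    PySem.Int.bxor re ((1 : Int) <<< c) = re + 2 ^ c := by
  obtain ⟨j, rfl⟩ := hd
  have hp : (0:Int) < 2 ^ (c+1) := by positivity
  have hj : 0 ≤ j := nonneg_of_mul_nonneg_right h0 hp
  have h1 : ((1 : Int) <<< c) = ((2 ^ c : Nat) : Int) := by
    simp [Int.shiftLeft_eq]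
  have h3 : ((2 ^ c : Nat) : Int).toNat = 2 ^ c := Int.toNat_natCast _
  rw [h1, PySem.Int.bxor_of_nonneg h0 (by positivity), h3,
      Int.toNat_mul (by positivity) hj,
      show ((2:Int) ^ (c+1)).toNat = 2 ^ (c+1) by
        rw [show ((2:Int) ^ (c+1)) = ((2 ^ (c+1) : Nat) : Int) by push_cast; ring, Int.toNat_natCast],
      nat_xor_pow]
  push_cast
  rw [Int.toNat_of_nonneg hj]

lemma loop_eq (c : Nat) : ∀ (n re : Int), 0 ≤ re → (2 ^ c : Int) ∣ re →
    reverseBits3Loop n c re = re + pvR n c := by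
  induction c with
  | zero => intro n re _ _; simp [reverseBits3Loop, pvR]
  | succ k ih =>
    intro n re h0 hd
    have hmod := PySem.Int.band_one n
    have hnn := PySem.Int.mod_nonneg n (b := 2) (by norm_num)
    have hlt := PySem.Int.mod_lt n (b := 2) (by norm_num)
    have hdk : (2 ^ k : Int) ∣ re := dvd_trans ⟨2, by ring⟩ hd
    simp only [reverseBits3Loop, pvR, hmod]
    by_cases hb : PySem.Int.mod n 2 = 1
    · rw [if_pos hb, bxor_pow re k h0 hd,
          ih (n >>> (1 : Nat)) (re + 2 ^ k) (by positivity) (by exact dvd_add hdk ⟨1, by ring⟩)]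
      rw [hb]; ring
    · rw [if_neg hb, ih (n >>> (1 : Nat)) re h0 hdk]
      have : PySem.Int.mod n 2 = 0 := by omega
      rw [this]; ring

lemma shiftRight_one_shiftRight (n : Int) (c : Nat) : (n >>> (1 : Nat)) >>> c = n >>> (1 + c) := by
  simp only [Int.shiftRight_eq_div_pow]
  rw [Int.ediv_ediv_of_nonneg (by positivity)]
  norm_num [pow_add]

lemma emod_pow_ediv_two (n : Int) (c : Nat) :
    (n % (2 ^ (c+1))) / 2 = (n / 2) % 2 ^ c := by
  have hcomp : n / 2 / 2 ^ c = n / 2 ^ (c+1) := by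
    rw [Int.ediv_ediv_of_nonneg (by norm_num)]
    norm_num [pow_succ, mul_comm]
  rw [Int.emod_def, Int.emod_def, hcomp,
      show n - 2 ^ (c+1) * (n / 2 ^ (c+1)) = n + 2 ^ c * (-(n / 2 ^ (c+1))) * 2 by ring,
      Int.add_mul_ediv_right _ _ (by norm_num)]
  ring

lemma pvR_mod (c : Nat) : ∀ n : Int, pvR (PySem.Int.mod n (2 ^ c)) c = pvR n c := by
  induction c with
  | zero => intro n; simp [pvR]
  | succ k ih =>
    intro n
    have hpos : (0:Int) < 2 ^ (k+1) := by positivity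
    rw [PySem.Int.mod_eq_emod_of_pos hpos]
    simp only [pvR]
    have h1 : PySem.Int.mod (n % 2 ^ (k+1)) 2 = PySem.Int.mod n 2 := by
      rw [PySem.Int.mod_eq_emod_of_pos (by norm_num), PySem.Int.mod_eq_emod_of_pos (by norm_num),
          Int.emod_emod_of_dvd n ⟨2 ^ k, by ring⟩]
    have h2 : (n % 2 ^ (k+1)) >>> (1 : Nat) = (n >>> (1 : Nat)) % 2 ^ k := by
      simp only [Int.shiftRight_eq_div_pow]
      norm_num [emod_pow_ediv_two n k]
    rw [h1, h2, ← PySem.Int.mod_eq_emod_of_pos (show (0:Int) < 2 ^ k by positivity), ih]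

lemma pvR_add (c : Nat) : ∀ (d : Nat) (n : Int),
    pvR n (c + d) = pvR n c * 2 ^ d + pvR (n >>> c) d := by
  induction c with
  | zero => intro d n; simp [pvR]
  | succ k ih =>
    intro d n
    have : k + 1 + d = (k + d) + 1 := by omega
    rw [this]
    simp only [pvR]
    rw [ih d (n >>> (1 : Nat)), shiftRight_one_shiftRight,
        show 1 + k = k + 1 by omega, pow_add]
    ring

lemma revAux_pow (k : Nat) : ∀ m : Int, revAux m (2 ^ k) = pvR m (2 ^ k) := by
  induction k with
  | zero =>
    intro m
    rw [revAux]
    simp [pvR, PySem.Int.band_one]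
  | succ k ih =>
    intro m
    have hw : ¬ (2 ^ (k+1) ≤ 1) := by
      have : 2 ≤ 2 ^ (k+1) := by
        calc 2 = 2 ^ 1 := by norm_num
        _ ≤ 2 ^ (k+1) := Nat.pow_le_pow_right (by norm_num) (by omega)
      omega
    have hh : (2 ^ (k+1) : Nat) >>> 1 = 2 ^ k := by
      rw [Nat.shiftRight_one, pow_succ, Nat.mul_div_cancel _ (by norm_num)]
    rw [revAux, if_neg hw]
    simp only [hh]
    have hshl : ((1 : Int) <<< ((2 ^ k : Nat))) = (2 ^ (2 ^ k) : Int) := by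
      simp [Int.shiftLeft_eq]
    rw [hshl, ih, ih, pvR_mod, Int.shiftLeft_eq,
        show (2 : Nat) ^ (k+1) = 2 ^ k + 2 ^ k by rw [pow_succ]; ring,
        pvR_add]

-- ===== VERDICT (by name: the statement is the Claim_ definition above) =====
theorem reverseBits3_spec : Claim_equal_reverseBits3 := by
  intro n _
  unfold Spec_reverseBits3 reverseBits3 reverseBits3_alt
  rw [loop_eq 32 n 0 le_rfl (dvd_zero _), zero_add,
      show ((1 : Int) <<< (32 : Int)) = (2 ^ 32 : Int) by decide,
      show (32 : Nat) = 2 ^ 5 by norm_num,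
      revAux_pow, pvR_mod]
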